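-- pv_equiv track=rewrite | github.com/bili256355/easm_project01 | stage_partition/V7/src/stage_partition_v7/accepted_windows_multi_object_prepost_v7_z_multiwin_a.py | _family_direction
-- ===== SOURCE A (Python) =====
-- from typing import Dict, List, Optional, Sequence, Tuple
--
-- def _family_direction(decisions: Sequence[str]) -> str:
--     txt = "|".join([str(x) for x in decisions if str(x) != "nan"])
--     if "A_direction_supported" in txt or "A_earlier_supported" in txt:
--         return "A_supported"
--     if "B_direction_supported" in txt or "B_earlier_supported" in txt:
--         return "B_supported"
--     if "A_direction_tendency" in txt or "A_earlier_tendency" in txt: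
--         return "A_tendency"
--     if "B_direction_tendency" in txt or "B_earlier_tendency" in txt:
--         return "B_tendency"
--     return "unresolved"
-- ===== SOURCE B (Python) =====
-- def _prio(s):
--     if "A_direction_supported" in s or "A_earlier_supported" in s:
--         return 0
--     if "B_direction_supported" in s or "B_earlier_supported" in s:
--         return 1
--     if "A_direction_tendency" in s or "A_earlier_tendency" in s:
--         return 2
--     if "B_direction_tendency" in s or "B_earlier_tendency" in s:
--         return 3
--     return 4
--
-- def _family_direction(decisions):
--     best = 4
--     for x in decisions:
--         s = str(x)
--         if s != "nan":
--             best = min(best, _prio(s))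
--     return ["A_supported", "B_supported", "A_tendency", "B_tendency", "unresolved"][best]
-- ===== Notes on version B (the rewrite author's own statement) =====
-- stated objective: alternative
-- what changed: Replaces A's build-one-joined-string-then-eight-priority-ordered-substring-scans-with-eager-return by a single pass over the decision elements that keeps the minimum category priority seen (supported before tendency, A before B) and finally indexes an ordered label list.
import Mathlib
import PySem

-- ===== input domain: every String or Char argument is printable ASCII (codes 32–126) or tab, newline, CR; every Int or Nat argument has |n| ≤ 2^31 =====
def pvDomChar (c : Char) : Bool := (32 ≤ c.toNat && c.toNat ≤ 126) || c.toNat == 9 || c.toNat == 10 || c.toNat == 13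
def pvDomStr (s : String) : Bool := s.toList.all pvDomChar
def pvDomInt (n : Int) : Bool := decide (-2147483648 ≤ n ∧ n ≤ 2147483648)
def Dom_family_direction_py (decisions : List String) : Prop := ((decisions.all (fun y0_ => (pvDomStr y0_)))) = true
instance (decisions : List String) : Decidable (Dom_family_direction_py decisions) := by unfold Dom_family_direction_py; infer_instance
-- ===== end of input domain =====

-- B replaces A's "join everything into one big string, then eight priority-ordered substring
-- scans with eager return" by a single pass over the elements that keeps the minimum category
-- priority seen, then looks the label up; same return value everywhere (objective: alternative).

-- ===== PORT A =====
def family_direction_py (decisions : List String) : String :=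
  let txt := PySem.Str.join "|" (decisions.filter (fun x => x ≠ "nan"))
  if PySem.Str.isIn "A_direction_supported" txt || PySem.Str.isIn "A_earlier_supported" txt then
    "A_supported"
  else if PySem.Str.isIn "B_direction_supported" txt || PySem.Str.isIn "B_earlier_supported" txt then
    "B_supported"
  else if PySem.Str.isIn "A_direction_tendency" txt || PySem.Str.isIn "A_earlier_tendency" txt then
    "A_tendency"
  else if PySem.Str.isIn "B_direction_tendency" txt || PySem.Str.isIn "B_earlier_tendency" txt then
    "B_tendency"
  else "unresolved"

-- ===== PORT B =====
def pvPrio (s : String) : Nat :=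
  if PySem.Str.isIn "A_direction_supported" s || PySem.Str.isIn "A_earlier_supported" s then 0
  else if PySem.Str.isIn "B_direction_supported" s || PySem.Str.isIn "B_earlier_supported" s then 1
  else if PySem.Str.isIn "A_direction_tendency" s || PySem.Str.isIn "A_earlier_tendency" s then 2
  else if PySem.Str.isIn "B_direction_tendency" s || PySem.Str.isIn "B_earlier_tendency" s then 3
  else 4

def family_direction_py_alt (decisions : List String) : String :=
  let best := decisions.foldl (fun best x => if x ≠ "nan" then min best (pvPrio x) else best) 4
  -- list indexing: best ≤ 4 always holds, so getD never falls back to its default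
  ["A_supported", "B_supported", "A_tendency", "B_tendency", "unresolved"].getD best "unresolved"

-- ===== PRECONDITION & SPEC =====
def Spec_family_direction_py (decisions : List String) (out : String) : Prop := out = family_direction_py_alt decisions
instance (decisions : List String) (out : String) : Decidable (Spec_family_direction_py decisions out) := by unfold Spec_family_direction_py; infer_instance

-- ===== CLAIM (what is proved, stated in full; the proofs are below) =====
def Claim_equal_family_direction_py : Prop := ∀ (decisions : List String), Dom_family_direction_py decisions → Spec_family_direction_py decisions (family_direction_py decisions)

-- ===== LEMMAS AND PROOFS =====

-- a pattern not containing c is a prefix of a ++ c :: b iff it is a prefix of a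
theorem pv_prefix_append_cons {pat : List Char} {c : Char} (hc : c ∉ pat) :
    ∀ (a b : List Char), (pat <+: a ++ c :: b ↔ pat <+: a) := by
  induction pat with
  | nil => intro a b; simp
  | cons p pt ih =>
    intro a b
    cases a with
    | nil =>
      simp only [List.nil_append, List.cons_prefix_cons]
      constructor
      · rintro ⟨rfl, -⟩; exact absurd (List.mem_cons_self) hc
      · intro h; exact absurd h (by simp)
    | cons x a' =>
      simp only [List.cons_append, List.cons_prefix_cons]
      have hc' : c ∉ pt := fun h => hc (List.mem_cons_of_mem _ h)
      rw [ih hc' a' b]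

-- a pattern not containing c is an infix of a ++ c :: b iff it is an infix of a or of b
theorem pv_infix_append_cons {pat : List Char} {c : Char} (hc : c ∉ pat) :
    ∀ (a b : List Char), (pat <:+: a ++ c :: b ↔ pat <:+: a ∨ pat <:+: b) := by
  intro a
  induction a with
  | nil =>
    intro b
    rw [List.nil_append, List.infix_cons_iff]
    have hp : pat <+: c :: b ↔ pat <+: ([] : List Char) := by
      simpa using pv_prefix_append_cons hc [] b
    rw [hp]
    constructor
    · rintro (h | h)
      · rcases List.prefix_nil.mp h with rfl; exact Or.inl List.nil_infix
      · exact Or.inr h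
    · rintro (h | h)
      · rcases List.infix_nil.mp h with rfl; exact Or.inl List.nil_prefix
      · exact Or.inr h
  | cons x a' ih =>
    intro b
    simp only [List.cons_append, List.infix_cons_iff, ih b]
    have hp := pv_prefix_append_cons hc (x :: a') b
    rw [List.cons_append] at hp
    rw [hp]
    tauto

-- '|'-join membership = any-element membership, for a nonempty pattern without '|'
theorem pv_isIn_join_chars (pat : List Char) (hne : pat ≠ []) (hc : '|' ∉ pat) :
    ∀ (l : List (List Char)),
      PySem.Chars.isIn pat (PySem.Chars.join ['|'] l) =
        l.any (fun s => PySem.Chars.isIn pat s) := by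
  intro l
  induction l with
  | nil =>
    simp only [PySem.Chars.join_nil, List.any_nil]
    rw [PySem.Chars.isIn_eq_false_iff]
    intro h; exact hne (List.infix_nil.mp h)
  | cons x t ih =>
    cases t with
    | nil => simp [PySem.Chars.join_singleton]
    | cons y r =>
      rw [PySem.Chars.join_cons_cons, List.any_cons, ← ih]
      rw [show x ++ ['|'] ++ PySem.Chars.join ['|'] (y :: r)
            = x ++ '|' :: PySem.Chars.join ['|'] (y :: r) by simp]
      rcases h1 : PySem.Chars.isIn pat x with _ | _
      · rcases h2 : PySem.Chars.isIn pat (PySem.Chars.join ['|'] (y :: r)) with _ | _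
        · simp only [Bool.or_false]
          rw [PySem.Chars.isIn_eq_false_iff]
          rw [PySem.Chars.isIn_eq_false_iff] at h1 h2
          rw [pv_infix_append_cons hc]; tauto
        · simp only [Bool.or_true]
          rw [PySem.Chars.isIn_iff_infix] at h2 ⊢
          rw [pv_infix_append_cons hc]; tauto
      · simp only [Bool.true_or]
        rw [PySem.Chars.isIn_iff_infix] at h1 ⊢
        rw [pv_infix_append_cons hc]; tauto

-- Str-level corollary for the eight concrete patterns
theorem pv_isIn_join (p : String) (hne : p.toList ≠ []) (hc : '|' ∉ p.toList)
    (l : List String) :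
    PySem.Str.isIn p (PySem.Str.join "|" l) = l.any (fun s => PySem.Str.isIn p s) := by
  show PySem.Chars.isIn p.toList (PySem.Str.join "|" l).toList = _
  rw [PySem.Str.toList_join, show ("|" : String).toList = ['|'] from rfl,
      pv_isIn_join_chars p.toList hne hc]
  simp only [List.any_map]
  rfl

theorem pv_any_or {α : Type} (l : List α) (p q : α → Bool) :
    (l.any fun s => p s || q s) = (l.any p || l.any q) := by
  induction l with
  | nil => rfl
  | cons x t ih =>
    simp only [List.any_cons, ih]
    cases p x <;> cases q x <;> simp

-- the priority cascade over a list, matching A's branch order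
def pvP (l : List String) : Nat :=
  if l.any (fun s => PySem.Str.isIn "A_direction_supported" s || PySem.Str.isIn "A_earlier_supported" s) then 0
  else if l.any (fun s => PySem.Str.isIn "B_direction_supported" s || PySem.Str.isIn "B_earlier_supported" s) then 1
  else if l.any (fun s => PySem.Str.isIn "A_direction_tendency" s || PySem.Str.isIn "A_earlier_tendency" s) then 2
  else if l.any (fun s => PySem.Str.isIn "B_direction_tendency" s || PySem.Str.isIn "B_earlier_tendency" s) then 3
  else 4

theorem pvP_le (l : List String) : pvP l ≤ 4 := by
  unfold pvP; split_ifs <;> omega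

set_option maxHeartbeats 2000000 in
theorem pvP_cons (s : String) (t : List String) : pvP (s :: t) = min (pvPrio s) (pvP t) := by
  unfold pvP pvPrio
  simp only [List.any_cons]
  by_cases h0 : (PySem.Str.isIn "A_direction_supported" s || PySem.Str.isIn "A_earlier_supported" s) = true <;>
  by_cases h1 : (PySem.Str.isIn "B_direction_supported" s || PySem.Str.isIn "B_earlier_supported" s) = true <;>
  by_cases h2 : (PySem.Str.isIn "A_direction_tendency" s || PySem.Str.isIn "A_earlier_tendency" s) = true <;>
  by_cases h3 : (PySem.Str.isIn "B_direction_tendency" s || PySem.Str.isIn "B_earlier_tendency" s) = true <;>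
  simp only [h0, h1, h2, h3, Bool.true_or, Bool.not_eq_true] at * <;>
  simp [h0, h1, h2, h3] <;> split_ifs <;> omega

theorem pv_foldl_min (l : List String) :
    ∀ a, a ≤ 4 → l.foldl (fun b s => min b (pvPrio s)) a = min a (pvP l) := by
  induction l with
  | nil => intro a ha; simp [pvP]; omega
  | cons s t ih =>
    intro a ha
    rw [List.foldl_cons, ih (min a (pvPrio s)) (by omega), pvP_cons]
    omega

-- ===== VERDICT (by name: the statement is the Claim_ definition above) =====
theorem family_direction_py_spec : Claim_equal_family_direction_py := by
  intro decisions _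
  show family_direction_py decisions = family_direction_py_alt decisions
  have hB : family_direction_py_alt decisions =
      ["A_supported", "B_supported", "A_tendency", "B_tendency", "unresolved"].getD
        ((decisions.filter (fun x => x ≠ "nan")).foldl (fun b s => min b (pvPrio s)) 4)
        "unresolved" := by
    show (["A_supported", "B_supported", "A_tendency", "B_tendency", "unresolved"].getD
      (decisions.foldl (fun best x => if x ≠ "nan" then min best (pvPrio x) else best) 4)
      "unresolved") = _
    rw [List.foldl_filter]
    simp only [decide_eq_true_eq]
  rw [hB, pv_foldl_min _ 4 (le_refl 4)]
  set fl := decisions.filter (fun x => x ≠ "nan") with hfl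
  show (if PySem.Str.isIn "A_direction_supported" (PySem.Str.join "|" fl) || PySem.Str.isIn "A_earlier_supported" (PySem.Str.join "|" fl) then
      "A_supported"
    else if PySem.Str.isIn "B_direction_supported" (PySem.Str.join "|" fl) || PySem.Str.isIn "B_earlier_supported" (PySem.Str.join "|" fl) then
      "B_supported"
    else if PySem.Str.isIn "A_direction_tendency" (PySem.Str.join "|" fl) || PySem.Str.isIn "A_earlier_tendency" (PySem.Str.join "|" fl) then
      "A_tendency"
    else if PySem.Str.isIn "B_direction_tendency" (PySem.Str.join "|" fl) || PySem.Str.isIn "B_earlier_tendency" (PySem.Str.join "|" fl) then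
      "B_tendency"
    else "unresolved") = _
  rw [pv_isIn_join "A_direction_supported" (by decide) (by decide),
      pv_isIn_join "A_earlier_supported" (by decide) (by decide),
      pv_isIn_join "B_direction_supported" (by decide) (by decide),
      pv_isIn_join "B_earlier_supported" (by decide) (by decide),
      pv_isIn_join "A_direction_tendency" (by decide) (by decide),
      pv_isIn_join "A_earlier_tendency" (by decide) (by decide),
      pv_isIn_join "B_direction_tendency" (by decide) (by decide),
      pv_isIn_join "B_earlier_tendency" (by decide) (by decide),
      ← pv_any_or fl, ← pv_any_or fl, ← pv_any_or fl, ← pv_any_or fl]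
  rw [show min 4 (pvP fl) = pvP fl by have := pvP_le fl; omega]
  unfold pvP
  by_cases h0 : (fl.any fun s => PySem.Str.isIn "A_direction_supported" s || PySem.Str.isIn "A_earlier_supported" s) = true <;>
  by_cases h1 : (fl.any fun s => PySem.Str.isIn "B_direction_supported" s || PySem.Str.isIn "B_earlier_supported" s) = true <;>
  by_cases h2 : (fl.any fun s => PySem.Str.isIn "A_direction_tendency" s || PySem.Str.isIn "A_earlier_tendency" s) = true <;>
  by_cases h3 : (fl.any fun s => PySem.Str.isIn "B_direction_tendency" s || PySem.Str.isIn "B_earlier_tendency" s) = true <;>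
  simp only [h0, h1, h2, h3] <;> rfl
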